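-- pv_equiv track=rewrite | github.com/Bomtori/Study_codingTest | 프로그래머스/lv1/82612. 부족한 금액 계산하기/부족한 금액 계산하기.py | solution
-- ===== SOURCE A (Python) =====
-- def solution(price, money, count):
--     a = 0
--     for kk in range(count):
--         a += price * (kk+1)
--
--     if a > money:
--         return -1*(money - a)
--     else:
--         return 0
-- ===== SOURCE B (Python) =====
-- def solution(price, money, count):
--     n = count if count > 0 else 0
--     total = price * n * (n + 1) // 2
--     return max(total - money, 0)
-- ===== Notes on version B (the rewrite author's own statement) =====
-- stated objective: faster
-- what changed: Replaced the O(count) accumulation loop with the closed-form triangular sum price*n*(n+1)//2 and a max for the shortfall.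
import Mathlib
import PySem

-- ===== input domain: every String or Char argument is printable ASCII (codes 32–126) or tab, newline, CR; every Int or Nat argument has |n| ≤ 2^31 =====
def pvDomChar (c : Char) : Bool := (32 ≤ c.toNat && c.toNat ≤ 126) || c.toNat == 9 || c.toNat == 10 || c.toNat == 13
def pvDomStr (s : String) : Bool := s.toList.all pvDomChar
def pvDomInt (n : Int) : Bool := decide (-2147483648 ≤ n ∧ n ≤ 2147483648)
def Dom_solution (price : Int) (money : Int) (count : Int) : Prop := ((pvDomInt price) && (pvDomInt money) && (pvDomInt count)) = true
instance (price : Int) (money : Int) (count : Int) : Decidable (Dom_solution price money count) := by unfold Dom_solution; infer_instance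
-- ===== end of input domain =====

-- B replaces A's O(count) accumulation loop with the closed-form triangular sum (O(1)).


-- ===== PORT A =====
def solution (price : Int) (money : Int) (count : Int) : Int :=
  let a := (PySem.List.pyRange 0 count 1).foldl (fun a kk => a + price * (kk + 1)) 0
  if a > money then -1 * (money - a) else 0

-- ===== PORT B =====
def solution_alt (price : Int) (money : Int) (count : Int) : Int :=
  let n := if count > 0 then count else 0
  let total := PySem.Int.floordiv (price * n * (n + 1)) 2
  max (total - money) 0

-- ===== PRECONDITION & SPEC =====
def Spec_solution (price : Int) (money : Int) (count : Int) (out : Int) : Prop := out = solution_alt price money count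
instance (price : Int) (money : Int) (count : Int) (out : Int) : Decidable (Spec_solution price money count out) := by unfold Spec_solution; infer_instance

-- ===== CLAIM (what is proved, stated in full; the proofs are below) =====
def Claim_equal_solution : Prop := ∀ (price : Int) (money : Int) (count : Int), Dom_solution price money count → Spec_solution price money count (solution price money count)

-- ===== LEMMAS AND PROOFS =====

theorem pv_foldl_shift (price : Int) (l : List Int) (x : Int) :
    l.foldl (fun a kk => a + price * (kk + 1)) x = x + l.foldl (fun a kk => a + price * (kk + 1)) 0 := by
  induction l generalizing x with
  | nil => simp
  | cons h t ih =>
    simp only [List.foldl_cons]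
    rw [ih (x + price * (h + 1)), ih (0 + price * (h + 1))]
    ring

theorem pv_sum_tri (price : Int) (n : Nat) :
    (PySem.List.pyRange 0 (n : Int) 1).foldl (fun a kk => a + price * (kk + 1)) 0
      = PySem.Int.floordiv (price * n * (n + 1)) 2 := by
  induction n with
  | zero => simp [PySem.List.pyRange_one_eq_nil, PySem.Int.floordiv]
  | succ m ih =>
    have h : ((m + 1 : Nat) : Int) = (m : Int) + 1 := by push_cast; ring
    rw [h, PySem.List.pyRange_one_succ_right (by positivity), List.foldl_append]
    simp only [List.foldl_cons, List.foldl_nil]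
    rw [pv_foldl_shift, ih]
    have e1 : price * (m : Int) * ((m : Int) + 1) = 2 * (price * (m : Int) * ((m : Int) + 1) / 2) := by
      rcases Int.even_mul_succ_self (m : Int) with ⟨k, hk⟩
      have h2 : price * (m : Int) * ((m : Int) + 1) = 2 * (price * k) := by
        rw [mul_assoc, hk]; ring
      rw [h2]; simp
    have e2 : price * ((m : Int) + 1) * (((m : Int) + 1) + 1) = 2 * (price * ((m : Int) + 1) * (((m : Int) + 1) + 1) / 2) := by
      rcases Int.even_mul_succ_self ((m : Int) + 1) with ⟨k, hk⟩
      have h2 : price * ((m : Int) + 1) * (((m : Int) + 1) + 1) = 2 * (price * k) := by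
        rw [mul_assoc, hk]; ring
      rw [h2]; simp
    rw [PySem.Int.floordiv_eq_ediv_of_pos (by norm_num), PySem.Int.floordiv_eq_ediv_of_pos (by norm_num)]
    have h3 : price * ((m : Int) + 1) * (((m : Int) + 1) + 1)
        = price * (m : Int) * ((m : Int) + 1) + 2 * (price * ((m : Int) + 1)) := by ring
    omega

-- ===== VERDICT (by name: the statement is the Claim_ definition above) =====
theorem solution_spec : Claim_equal_solution := by
  intro price money count _
  unfold Spec_solution solution solution_alt
  by_cases hc : count > 0
  · have hn : count = ((count.toNat : Nat) : Int) := by omega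
    simp only [if_pos hc]
    rw [hn, pv_sum_tri]
    split_ifs with h <;> omega
  · simp only [if_neg hc]
    rw [PySem.List.pyRange_one_eq_nil (by omega)]
    simp only [List.foldl_nil]
    have h0 : PySem.Int.floordiv (price * 0 * (0 + 1)) 2 = 0 := by
      simp [PySem.Int.floordiv]
    rw [h0]
    split_ifs with h <;> omega
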